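-- pv_equiv track=rewrite | github.com/Dyr-El/the_song_of_ducks_and_dragons | quest_14_1.py | step
-- ===== SOURCE A (Python) =====
-- def step(board):
--     new_board = dict()
--     for (x, y), active in board.items():
--         active_neighbors = sum((board.get((x + dx, y + dy), False)
--                                 for dx, dy in ((-1, -1), (1, 1), (-1, 1), (1, -1))))
--         new_board[(x, y)] = ((active and active_neighbors % 2 == 1) or
--                              (not active and active_neighbors % 2== 0))
--     return new_board
-- ===== SOURCE B (Python) =====
-- def step(board):
--     dirs = ((-1, -1), (1, 1), (-1, 1), (1, -1))
--     counts = {}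
--     for (x, y), v in board.items():
--         if v:
--             for dx, dy in dirs:
--                 k = (x + dx, y + dy)
--                 counts[k] = counts.get(k, 0) + 1
--     return {(x, y): (counts.get((x, y), 0) % 2 == 1) == v
--             for (x, y), v in board.items()}
-- ===== Notes on version B (the rewrite author's own statement) =====
-- stated objective: alternative
-- what changed: Replaced the per-cell gather (4 dict lookups into the old board for every cell) by a scatter: one pass accumulates, for every live cell, +1 into a counts dict at each of its 4 diagonal positions, and a second pass reads each cell's accumulated parity with counts.get((x,y),0).
import Mathlib
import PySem

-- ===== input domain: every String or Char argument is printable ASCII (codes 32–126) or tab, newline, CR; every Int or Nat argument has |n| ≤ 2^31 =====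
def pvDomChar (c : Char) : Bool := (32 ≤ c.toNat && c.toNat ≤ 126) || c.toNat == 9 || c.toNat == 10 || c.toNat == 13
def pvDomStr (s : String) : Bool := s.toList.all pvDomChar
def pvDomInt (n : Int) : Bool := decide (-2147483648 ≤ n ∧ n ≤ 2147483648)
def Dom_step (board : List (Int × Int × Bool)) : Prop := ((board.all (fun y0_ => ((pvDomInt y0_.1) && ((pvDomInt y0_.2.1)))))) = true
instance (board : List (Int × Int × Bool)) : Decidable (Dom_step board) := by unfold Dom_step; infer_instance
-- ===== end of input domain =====

-- B changes the decomposition: instead of A's per-cell gather of 4 neighbour lookups,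
-- B scatters +1 from every live cell into a counts dict and then reads each cell's parity.

-- ===== PORT A =====
-- board.get(p, False): first-match lookup in the association list (dict convention)
def lookupA : List (Int × Int × Bool) → Int × Int → Bool
  | [], _ => false
  | (x, y, v) :: rest, p => if (x, y) = p then v else lookupA rest p

def step (board : List (Int × Int × Bool)) : List (Int × Int × Bool) :=
  board.map (fun e =>
    let x := e.1; let y := e.2.1; let active := e.2.2
    -- sum(board.get((x+dx,y+dy), False) for dx,dy in ((-1,-1),(1,1),(-1,1),(1,-1)))
    let n : Int := (if lookupA board (x - 1, y - 1) then 1 else 0)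
                 + (if lookupA board (x + 1, y + 1) then 1 else 0)
                 + (if lookupA board (x - 1, y + 1) then 1 else 0)
                 + (if lookupA board (x + 1, y - 1) then 1 else 0)
    (x, y, (active && n % 2 == 1) || (!active && n % 2 == 0)))

-- ===== PORT B =====
def nbrsB (x y : Int) : List (Int × Int) :=
  [(x - 1, y - 1), (x + 1, y + 1), (x - 1, y + 1), (x + 1, y - 1)]

def countsB (board : List (Int × Int × Bool)) : PySem.Dict (Int × Int) Int :=
  board.foldl
    (fun d e =>
      if e.2.2 then
        (nbrsB e.1 e.2.1).foldl (fun d k => d.insert k (d.getD k 0 + 1)) d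
      else d)
    PySem.Dict.empty

def step_alt (board : List (Int × Int × Bool)) : List (Int × Int × Bool) :=
  let counts := countsB board
  board.map (fun e => (e.1, e.2.1, ((counts.getD (e.1, e.2.1) 0) % 2 == 1) == e.2.2))

-- ===== PRECONDITION & SPEC =====
-- Pre_ excludes association lists with duplicate (x,y) keys: they do not denote a Python
-- dict (which cannot hold duplicate keys), so the encoding's first-match corner is nobody's.
def Pre_step (board : List (Int × Int × Bool)) : Prop :=
  (board.map (fun e => (e.1, e.2.1))).Nodup

instance (board : List (Int × Int × Bool)) : Decidable (Pre_step board) := by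
  unfold Pre_step; infer_instance

def pvWitness_step : (List (Int × Int × Bool)) := [(0, 0, true), (1, 1, false), (2, 0, true)]

def Spec_step (board : List (Int × Int × Bool)) (out : List (Int × Int × Bool)) : Prop := out = step_alt board
instance (board : List (Int × Int × Bool)) (out : List (Int × Int × Bool)) : Decidable (Spec_step board out) := by unfold Spec_step; infer_instance

-- ===== CLAIM (what is proved, stated in full; the proofs are below) =====
def Claim_equal_step : Prop := ∀ (board : List (Int × Int × Bool)), Dom_step board → Pre_step board → Spec_step board (step board)

-- ===== LEMMAS AND PROOFS =====

-- the keys a live cell scatters into, flattened over the whole board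
def scatterKeys (board : List (Int × Int × Bool)) : List (Int × Int) :=
  board.flatMap (fun e => if e.2.2 then nbrsB e.1 e.2.1 else [])

-- number of entries of `board` with key q and value true
def tc (board : List (Int × Int × Bool)) (q : Int × Int) : Int :=
  (board.countP (fun e => e.2.2 && decide ((e.1, e.2.1) = q)) : Int)

lemma tc_nil (q : Int × Int) : tc [] q = 0 := rfl

lemma tc_cons (e : Int × Int × Bool) (rest : List (Int × Int × Bool)) (q : Int × Int) :
    tc (e :: rest) q = (if e.2.2 = true ∧ (e.1, e.2.1) = q then 1 else 0) + tc rest q := by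
  simp only [tc, List.countP_cons]
  push_cast
  by_cases h : e.2.2 = true ∧ (e.1, e.2.1) = q
  · rw [if_pos (by simp [h.1, h.2]), if_pos h]; ring
  · rw [if_neg (by simpa using h), if_neg h]; ring

lemma tc_eq_zero_of_not_mem (board : List (Int × Int × Bool)) (q : Int × Int)
    (h : q ∉ board.map (fun e => (e.1, e.2.1))) : tc board q = 0 := by
  induction board with
  | nil => rfl
  | cons e rest ih =>
    rw [tc_cons]
    simp only [List.map_cons, List.mem_cons, not_or] at h
    rw [if_neg (by tauto), ih h.2]
    ring

lemma lookupA_eq_tc (board : List (Int × Int × Bool)) (q : Int × Int)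
    (hnd : (board.map (fun e => (e.1, e.2.1))).Nodup) :
    (if lookupA board q then (1 : Int) else 0) = tc board q := by
  induction board with
  | nil => rfl
  | cons e rest ih =>
    obtain ⟨x, y, v⟩ := e
    simp only [List.map_cons, List.nodup_cons] at hnd
    rw [tc_cons]
    by_cases h : (x, y) = q
    · subst h
      rw [tc_eq_zero_of_not_mem rest (x, y) hnd.1]
      cases v <;> simp [lookupA]
    · have hl : lookupA ((x, y, v) :: rest) q = lookupA rest q := by
        simp only [lookupA]
        exact if_neg h
      have ht : ¬((x, y, v).2.2 = true ∧ ((x, y, v).1, (x, y, v).2.1) = q) := by simp [h]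
      rw [hl, if_neg ht, ih hnd.2, zero_add]

-- the four diagonal neighbours of a fixed key are pairwise distinct, so a live cell's
-- scatter list contributes to (x,y) exactly the adjacency indicators
lemma count_nbrs (ex ey x y : Int) :
    (((nbrsB ex ey).count (x, y) : Int)) =
      (if (ex, ey) = (x - 1, y - 1) then 1 else 0) + (if (ex, ey) = (x + 1, y + 1) then 1 else 0)
      + (if (ex, ey) = (x - 1, y + 1) then 1 else 0) + (if (ex, ey) = (x + 1, y - 1) then 1 else 0) := by
  simp [nbrsB, List.count_cons, Prod.ext_iff]
  split_ifs <;> omega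

lemma scatter_count (board : List (Int × Int × Bool)) (x y : Int) :
    ((scatterKeys board).count (x, y) : Int) =
      tc board (x - 1, y - 1) + tc board (x + 1, y + 1)
      + tc board (x - 1, y + 1) + tc board (x + 1, y - 1) := by
  induction board with
  | nil => simp [scatterKeys, tc_nil]
  | cons e rest ih =>
    obtain ⟨ex, ey, v⟩ := e
    rw [show scatterKeys ((ex, ey, v) :: rest)
          = (if v then nbrsB ex ey else []) ++ scatterKeys rest from rfl]
    rw [List.count_append]
    push_cast
    rw [ih]
    simp only [tc_cons]
    cases v
    · simp
    · simp only [true_and, if_true]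
      rw [count_nbrs]
      ring

-- getD through B's nested scatter fold
lemma countsB_getD (board : List (Int × Int × Bool)) (p : Int × Int) :
    (countsB board).getD p 0 = ((scatterKeys board).count p : Int) := by
  suffices h : ∀ (d : PySem.Dict (Int × Int) Int) (b : List (Int × Int × Bool)),
      (b.foldl (fun d e => if e.2.2 then
          (nbrsB e.1 e.2.1).foldl (fun d k => d.insert k (d.getD k 0 + 1)) d else d) d).getD p 0
        = d.getD p 0 + ((scatterKeys b).count p : Int) by
    have := h PySem.Dict.empty board
    simpa [countsB, PySem.Dict.getD_empty] using this
  intro d b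
  induction b generalizing d with
  | nil => simp [scatterKeys]
  | cons e rest ih =>
    obtain ⟨ex, ey, v⟩ := e
    rw [show scatterKeys ((ex, ey, v) :: rest)
          = (if v then nbrsB ex ey else []) ++ scatterKeys rest from rfl]
    rw [List.count_append, List.foldl_cons]
    cases v
    · simp [ih]
    · simp only [if_true]
      rw [ih, PySem.Dict.getD_foldl_insert_add_one]
      push_cast
      ring

-- the boolean rewrite of A's two-branch formula
lemma bool_formula (a : Bool) (n : Int) :
    ((a && n % 2 == 1) || (!a && n % 2 == 0)) = ((n % 2 == 1) == a) := by
  rcases Int.emod_two_eq n with h | h <;> cases a <;> simp [h]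

theorem step_eq (board : List (Int × Int × Bool)) (hpre : Pre_step board) :
    step board = step_alt board := by
  unfold step step_alt
  apply List.map_congr_left
  intro e _
  obtain ⟨x, y, a⟩ := e
  simp only
  rw [countsB_getD, scatter_count]
  rw [lookupA_eq_tc board _ hpre, lookupA_eq_tc board _ hpre,
      lookupA_eq_tc board _ hpre, lookupA_eq_tc board _ hpre]
  exact congrArg (fun b => (x, y, b)) (bool_formula a _)

-- ===== VERDICT (by name: the statement is the Claim_ definition above) =====
theorem step_spec : Claim_equal_step := by
  intro board _ hpre
  unfold Spec_step
  exact step_eq board hpre
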